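-- pv_equiv track=rewrite | github.com/cjsindt/aoc_2023 | 2/cjsindt/2.py | minimize_game
-- ===== SOURCE A (Python) =====
-- def minimize_game(game):
--     output = [0, 0, 0]
--     for s in game:
--         for c in game[s]:
--             if c == 'red':
--                 if game[s][c] > output[0]:
--                     output[0] = game[s][c]
--             if c == 'green':
--                 if game[s][c] > output[1]:
--                     output[1] = game[s][c]
--             if c == 'blue':
--                 if game[s][c] > output[2]:
--                     output[2] = game[s][c]
--
--     return output
-- ===== SOURCE B (Python) =====
-- def minimize_game(game):
--     return [max([0] + [game[s][c] for s in game if c in game[s]])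
--             for c in ('red', 'green', 'blue')]
-- ===== Notes on version B (the rewrite author's own statement) =====
-- stated objective: simpler
-- what changed: Replaces the single fused pass that updates three maxima in an output list with three independent per-color scans (a comprehension over the colors, each taking max of a 0-seeded list of that color's counts), inverting the loop nesting.
import Mathlib
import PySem

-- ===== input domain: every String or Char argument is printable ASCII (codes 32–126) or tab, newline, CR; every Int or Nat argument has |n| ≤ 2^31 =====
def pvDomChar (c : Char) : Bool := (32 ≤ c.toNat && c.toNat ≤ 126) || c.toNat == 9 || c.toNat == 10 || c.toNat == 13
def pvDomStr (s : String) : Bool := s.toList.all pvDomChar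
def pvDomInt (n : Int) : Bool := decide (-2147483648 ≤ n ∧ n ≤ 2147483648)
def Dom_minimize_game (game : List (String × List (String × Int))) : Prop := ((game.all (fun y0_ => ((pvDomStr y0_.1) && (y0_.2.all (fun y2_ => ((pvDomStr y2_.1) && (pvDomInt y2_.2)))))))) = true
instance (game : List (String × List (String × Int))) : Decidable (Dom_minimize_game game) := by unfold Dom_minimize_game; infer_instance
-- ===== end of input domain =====

-- B computes the same three maxima as A but with three per-color passes instead of one fused pass (objective: simpler).

-- ===== PORT A =====
-- loop body of A's inner 'for c in game[s]' loop (the three guarded updates, in order)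
def mgStep (output : List Int) (cv : String × Int) : List Int :=
  let output := if cv.1 = "red" ∧ cv.2 > output.getD 0 0 then output.set 0 cv.2 else output
  let output := if cv.1 = "green" ∧ cv.2 > output.getD 1 0 then output.set 1 cv.2 else output
  if cv.1 = "blue" ∧ cv.2 > output.getD 2 0 then output.set 2 cv.2 else output

def minimize_game (game : List (String × List (String × Int))) : List Int :=
  game.foldl (fun output s => s.2.foldl mgStep output) [0, 0, 0]

-- ===== PORT B =====
-- [max([0] + [game[s][c] for s in game if c in game[s]]) for c in ('red','green','blue')]
-- 'c in game[s]' + 'game[s][c]' = first-match lookup in the inner association list (List.lookup)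
def minimize_game_alt (game : List (String × List (String × Int))) : List Int :=
  ["red", "green", "blue"].map (fun c =>
    (game.filterMap (fun s => s.2.lookup c)).foldl max 0)

-- ===== PRECONDITION & SPEC =====
-- Pre_ excludes only association lists with duplicate keys (outer or inner): a Python dict
-- cannot contain a duplicate key, so such lists represent no input of the Python programs.
def Pre_minimize_game (game : List (String × List (String × Int))) : Prop :=
  (game.map Prod.fst).Nodup ∧ ∀ s ∈ game, (s.2.map Prod.fst).Nodup
instance (game : List (String × List (String × Int))) : Decidable (Pre_minimize_game game) := by
  unfold Pre_minimize_game; infer_instance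

def pvWitness_minimize_game : (List (String × List (String × Int))) :=
  [("a", [("red", 2), ("blue", 1)]), ("b", [("green", 3)])]

def Spec_minimize_game (game : List (String × List (String × Int))) (out : List Int) : Prop := out = minimize_game_alt game
instance (game : List (String × List (String × Int))) (out : List Int) : Decidable (Spec_minimize_game game out) := by unfold Spec_minimize_game; infer_instance

-- ===== CLAIM (what is proved, stated in full; the proofs are below) =====
def Claim_equal_minimize_game : Prop := ∀ (game : List (String × List (String × Int))), Dom_minimize_game game → Pre_minimize_game game → Spec_minimize_game game (minimize_game game)

-- ===== LEMMAS AND PROOFS =====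

-- the effect of one fused step on one color's component
def fcol (c0 : String) (a : Int) (cv : String × Int) : Int :=
  if cv.1 = c0 ∧ cv.2 > a then cv.2 else a

theorem mgStep_eq (r g b : Int) (cv : String × Int) :
    mgStep [r, g, b] cv = [fcol "red" r cv, fcol "green" g cv, fcol "blue" b cv] := by
  simp only [mgStep, fcol]
  split_ifs <;> simp_all

theorem foldl_mgStep_eq (l : List (String × Int)) (r g b : Int) :
    l.foldl mgStep [r, g, b] =
      [l.foldl (fcol "red") r, l.foldl (fcol "green") g, l.foldl (fcol "blue") b] := by
  induction l generalizing r g b with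
  | nil => rfl
  | cons cv t ih => simp [List.foldl_cons, mgStep_eq, ih]

theorem foldl_fcol_of_not_mem (c : String) (l : List (String × Int)) (a : Int)
    (h : c ∉ l.map Prod.fst) : l.foldl (fcol c) a = a := by
  induction l generalizing a with
  | nil => rfl
  | cons cv t ih =>
    simp only [List.map_cons, List.mem_cons, not_or] at h
    simp [List.foldl_cons, fcol, Ne.symm h.1, ih _ h.2]

theorem foldl_fcol_eq_lookup (c : String) (l : List (String × Int)) (a : Int)
    (hnd : (l.map Prod.fst).Nodup) :
    l.foldl (fcol c) a = (match l.lookup c with | none => a | some v => max a v) := by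
  induction l generalizing a with
  | nil => rfl
  | cons cv t ih =>
    obtain ⟨k, v⟩ := cv
    simp only [List.map_cons, List.nodup_cons] at hnd
    by_cases hc : k = c
    · subst hc
      have hnm : k ∉ t.map Prod.fst := hnd.1
      simp only [List.foldl_cons, fcol, true_and, List.lookup, beq_self_eq_true]
      rw [foldl_fcol_of_not_mem k t _ hnm]
      simp only [max_def]
      split_ifs <;> omega
    · have hck : (c == k) = false := by simp [Ne.symm hc]
      simp only [List.foldl_cons, fcol, hc, false_and, if_false, List.lookup, hck]
      exact ih _ hnd.2

theorem outer_fold_eq (c : String) (game : List (String × List (String × Int))) (a : Int)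
    (hnd : ∀ s ∈ game, (s.2.map Prod.fst).Nodup) :
    game.foldl (fun acc s => s.2.foldl (fcol c) acc) a =
      (game.filterMap (fun s => s.2.lookup c)).foldl max a := by
  induction game generalizing a with
  | nil => rfl
  | cons s t ih =>
    have hs := hnd s (List.mem_cons_self ..)
    have ht : ∀ x ∈ t, (x.2.map Prod.fst).Nodup := fun x hx => hnd x (List.mem_cons_of_mem _ hx)
    simp only [List.foldl_cons, List.filterMap_cons]
    rw [foldl_fcol_eq_lookup c s.2 a hs]
    cases s.2.lookup c with
    | none => exact ih _ ht
    | some v => simpa using ih _ ht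

theorem outer_mg (game : List (String × List (String × Int))) (r g b : Int) :
    game.foldl (fun output s => s.2.foldl mgStep output) [r, g, b] =
      [game.foldl (fun a s => s.2.foldl (fcol "red") a) r,
       game.foldl (fun a s => s.2.foldl (fcol "green") a) g,
       game.foldl (fun a s => s.2.foldl (fcol "blue") a) b] := by
  induction game generalizing r g b with
  | nil => rfl
  | cons s t ih => simp only [List.foldl_cons, foldl_mgStep_eq, ih]

-- ===== VERDICT (by name: the statement is the Claim_ definition above) =====
theorem minimize_game_spec : Claim_equal_minimize_game := by
  intro game _ hpre
  unfold Spec_minimize_game minimize_game minimize_game_alt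
  rw [outer_mg]
  simp only [List.map_cons, List.map_nil]
  rw [outer_fold_eq _ _ _ hpre.2, outer_fold_eq _ _ _ hpre.2, outer_fold_eq _ _ _ hpre.2]
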